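-- pv_equiv track=rewrite | github.com/AlburquequeDiego/leanmaker | Backend/core/utils.py | format_rut
-- ===== SOURCE A (Python) =====
-- def format_rut(clean_rut):
--     """
--     Formatea un RUT para mostrar
--
--     Args:
--         clean_rut (str): RUT limpio (sin formato)
--
--     Returns:
--         str: RUT formateado (XX.XXX.XXX-X)
--     """
--     rut_number = clean_rut[:-1]
--     dv = clean_rut[-1]
--
--     # Agregar puntos cada 3 dígitos desde la derecha
--     formatted = ''
--     for i in range(len(rut_number) - 1, -1, -1):
--         if (len(rut_number) - 1 - i) % 3 == 0 and i != len(rut_number) - 1: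
--             formatted = '.' + formatted
--         formatted = rut_number[i] + formatted
--
--     # Agregar dígito verificador con guión
--     return f"{formatted}-{dv}"
-- ===== SOURCE B (Python) =====
-- def format_rut(clean_rut):
--     """
--     Formatea un RUT para mostrar (XX.XXX.XXX-X).
--     """
--     rut_number = clean_rut[:-1]
--     dv = clean_rut[-1]
--
--     # Collect 3-digit groups by slicing from the right, then join with dots
--     groups = []
--     i = len(rut_number)
--     while i > 0:
--         groups.append(rut_number[max(0, i - 3):i])
--         i -= 3
--     formatted = '.'.join(reversed(groups))
--
--     return f"{formatted}-{dv}"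
-- ===== Notes on version B (the rewrite author's own statement) =====
-- stated objective: simpler
-- what changed: Replaces the char-by-char right-to-left loop with a modulo-3 dot-position test by slice-chunking: collect 3-character groups from the right by slicing, reverse, and join with '.'.
import Mathlib
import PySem

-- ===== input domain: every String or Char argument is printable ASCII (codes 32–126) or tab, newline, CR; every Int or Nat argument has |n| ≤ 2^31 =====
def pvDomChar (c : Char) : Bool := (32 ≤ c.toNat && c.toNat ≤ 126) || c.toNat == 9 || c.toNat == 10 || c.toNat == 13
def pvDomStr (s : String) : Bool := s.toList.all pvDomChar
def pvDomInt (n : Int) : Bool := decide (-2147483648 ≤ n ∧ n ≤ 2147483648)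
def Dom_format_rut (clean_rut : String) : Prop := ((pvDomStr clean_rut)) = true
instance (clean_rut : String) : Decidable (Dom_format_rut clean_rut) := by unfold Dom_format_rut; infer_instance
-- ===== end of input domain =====

-- B builds the 3-digit groups by slicing from the right and joins them with dots, instead of A's
-- per-character right-to-left loop with a modulo-3 dot test (objective: simpler).

-- ===== PORT A =====
-- 'for i in range(len(rut_number)-1, -1, -1)' ported as a Nat countdown: the argument is the
-- loop index plus one, so the body runs at index i; indices are always in range.
def formatLoopA (l : List Char) : Nat → List Char → List Char
  | 0, acc => acc
  | i+1, acc =>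
      formatLoopA l i (l.getD i ' ' ::
        (if (l.length - 1 - i) % 3 = 0 ∧ i ≠ l.length - 1 then '.' :: acc else acc))

def format_rut (clean_rut : String) : String :=
  let cs := clean_rut.toList
  let rut_number := PySem.List.slice cs none (some (-1))
  let dv := PySem.List.pyGetD cs (-1) ' '       -- clean_rut[-1]; in range under Pre_
  let formatted := formatLoopA rut_number rut_number.length []
  String.mk (formatted ++ '-' :: [dv])

-- ===== PORT B =====
-- 'while i > 0: groups.append(rut_number[max(0, i-3):i]); i -= 3'
def chunksB (l : List Char) (i : Nat) (groups : List (List Char)) : List (List Char) :=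
  if 0 < i then
    chunksB l (i - 3) (groups ++ [PySem.List.slice l (some (max 0 ((i : Int) - 3))) (some (i : Int))])
  else groups
termination_by i
decreasing_by omega

def format_rut_alt (clean_rut : String) : String :=
  let cs := clean_rut.toList
  let rut_number := PySem.List.slice cs none (some (-1))
  let dv := PySem.List.pyGetD cs (-1) ' '       -- clean_rut[-1]; in range under Pre_
  let formatted := PySem.Chars.join ['.'] (chunksB rut_number rut_number.length []).reverse
  String.mk (formatted ++ '-' :: [dv])

-- ===== PRECONDITION & SPEC =====
-- The empty string is excluded: there clean_rut[-1] raises IndexError in both A and B.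
def Pre_format_rut (clean_rut : String) : Prop := clean_rut.toList ≠ []
instance (clean_rut : String) : Decidable (Pre_format_rut clean_rut) := by unfold Pre_format_rut; infer_instance

def pvWitness_format_rut : String := "123456789"

def Spec_format_rut (clean_rut : String) (out : String) : Prop := out = format_rut_alt clean_rut
instance (clean_rut : String) (out : String) : Decidable (Spec_format_rut clean_rut out) := by unfold Spec_format_rut; infer_instance

-- ===== CLAIM (what is proved, stated in full; the proofs are below) =====
def Claim_equal_format_rut : Prop := ∀ (clean_rut : String), Dom_format_rut clean_rut → Pre_format_rut clean_rut → Spec_format_rut clean_rut (format_rut clean_rut)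

-- ===== LEMMAS AND PROOFS =====

lemma formatLoopA_append (l : List Char) (i : Nat) :
    ∀ acc : List Char, formatLoopA l i acc = formatLoopA l i [] ++ acc := by
  induction i with
  | zero => intro acc; simp [formatLoopA]
  | succ i ih =>
      intro acc
      simp only [formatLoopA]
      rw [ih, ih (l.getD i ' ' :: _)]
      split <;> simp

lemma chunksB_append (l : List Char) (i : Nat) :
    ∀ g : List (List Char), chunksB l i g = g ++ chunksB l i [] := by
  induction i using Nat.strong_induction_on with
  | _ i ih =>
      intro g
      by_cases h : 0 < i
      · conv_lhs => rw [chunksB]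
        conv_rhs => rw [chunksB]
        simp only [h, if_pos, List.nil_append]
        rw [ih (i - 3) (by omega), ih (i - 3) (by omega) [_]]
        simp
      · conv_lhs => rw [chunksB]
        conv_rhs => rw [chunksB]
        simp [h]

lemma chunksB_zero (l : List Char) (g : List (List Char)) : chunksB l 0 g = g := by
  rw [chunksB]; simp

lemma chunksB_ne_nil (l : List Char) (i : Nat) (h : 0 < i) : chunksB l i [] ≠ [] := by
  rw [chunksB]
  simp only [h, if_pos]
  rw [chunksB_append]
  simp

lemma chunksB_step (l : List Char) (i : Nat) (h : 0 < i) :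
    chunksB l i [] =
      PySem.List.slice l (some (max 0 ((i : Int) - 3))) (some (i : Int)) :: chunksB l (i - 3) [] := by
  conv_lhs => rw [chunksB]
  simp only [h, if_pos, List.nil_append]
  rw [chunksB_append]
  rfl

lemma join_append_singleton (sep y : List Char) :
    ∀ xs : List (List Char), xs ≠ [] →
      PySem.Chars.join sep (xs ++ [y]) = PySem.Chars.join sep xs ++ sep ++ y := by
  intro xs
  induction xs with
  | nil => intro h; exact absurd rfl h
  | cons a xs ih =>
      intro _
      cases xs with
      | nil => simp [PySem.Chars.join_cons_cons, PySem.Chars.join_singleton]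
      | cons b t =>
          simp only [List.cons_append] at ih ⊢
          rw [PySem.Chars.join_cons_cons, PySem.Chars.join_cons_cons, ih (by simp)]
          simp

lemma drop_take_three (l : List Char) (k : Nat) (h : k + 3 ≤ l.length) :
    (l.drop k).take 3 = [l.getD k ' ', l.getD (k+1) ' ', l.getD (k+2) ' '] := by
  rw [List.getD_eq_getElem l ' ' (show k < l.length by omega),
      List.getD_eq_getElem l ' ' (show k + 1 < l.length by omega),
      List.getD_eq_getElem l ' ' (show k + 2 < l.length by omega),
      List.drop_eq_getElem_cons (show k < l.length by omega),
      List.drop_eq_getElem_cons (show k + 1 < l.length by omega),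
      List.drop_eq_getElem_cons (show k + 2 < l.length by omega)]
  simp only [List.take_succ_cons, List.take_zero]

lemma take_one_eq (l : List Char) (h : 1 ≤ l.length) : l.take 1 = [l.getD 0 ' '] := by
  cases l with
  | nil => simp at h
  | cons a t => simp [List.getD]

lemma take_two_eq (l : List Char) (h : 2 ≤ l.length) : l.take 2 = [l.getD 0 ' ', l.getD 1 ' '] := by
  cases l with
  | nil => simp at h
  | cons a t =>
      cases t with
      | nil => simp at h
      | cons b t' => simp [List.getD]

lemma main_lemma (l : List Char) :
    ∀ i : Nat, i ≤ l.length → (l.length - i) % 3 = 0 →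
      formatLoopA l i [] =
        PySem.Chars.join ['.'] (chunksB l i []).reverse ++
          (if 0 < i ∧ i < l.length then ['.'] else []) := by
  intro i
  induction i using Nat.strong_induction_on with
  | _ i ih =>
      intro hle hmod
      rcases eq_or_ne i 0 with h0 | h0
      · subst h0
        simp [formatLoopA, chunksB_zero, PySem.Chars.join_nil]
      rcases eq_or_ne i 1 with h1 | h1
      · subst h1
        rw [chunksB_step l 1 (by omega)]
        have hsl : PySem.List.slice l (some (max 0 (((1 : Nat) : Int) - 3))) (some ((1 : Nat) : Int))
            = l.take 1 := by
          rw [show max 0 (((1 : Nat) : Int) - 3) = (0 : Int) by push_cast; omega]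
          simp [PySem.List.slice_zero_start, PySem.List.slice_to]
        rw [hsl, take_one_eq l hle, show (1 : Nat) - 3 = 0 from rfl, chunksB_zero]
        simp only [formatLoopA, List.reverse_singleton, PySem.Chars.join_singleton]
        by_cases hn : 1 < l.length
        · rw [if_pos (show (l.length - 1 - 0) % 3 = 0 ∧ 0 ≠ l.length - 1 by omega),
              if_pos (show 0 < 1 ∧ 1 < l.length by omega)]
          simp
        · rw [if_neg (show ¬((l.length - 1 - 0) % 3 = 0 ∧ 0 ≠ l.length - 1) by omega),
              if_neg (show ¬(0 < 1 ∧ 1 < l.length) by omega)]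
          simp
      rcases eq_or_ne i 2 with h2 | h2
      · subst h2
        rw [chunksB_step l 2 (by omega)]
        have hsl : PySem.List.slice l (some (max 0 (((2 : Nat) : Int) - 3))) (some ((2 : Nat) : Int))
            = l.take 2 := by
          rw [show max 0 (((2 : Nat) : Int) - 3) = (0 : Int) by push_cast; omega]
          simp [PySem.List.slice_zero_start, PySem.List.slice_to]
        rw [hsl, take_two_eq l hle, show (2 : Nat) - 3 = 0 from rfl, chunksB_zero]
        simp only [formatLoopA, List.reverse_singleton, PySem.Chars.join_singleton]
        rw [if_neg (show ¬((l.length - 1 - 0) % 3 = 0 ∧ 0 ≠ l.length - 1) by omega)]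
        by_cases hn : 2 < l.length
        · rw [if_pos (show (l.length - 1 - 1) % 3 = 0 ∧ 1 ≠ l.length - 1 by omega),
              if_pos (show 0 < 2 ∧ 2 < l.length by omega)]
          simp
        · rw [if_neg (show ¬((l.length - 1 - 1) % 3 = 0 ∧ 1 ≠ l.length - 1) by omega),
              if_neg (show ¬(0 < 2 ∧ 2 < l.length) by omega)]
          simp
      obtain ⟨k, rfl⟩ : ∃ k, i = k + 3 := ⟨i - 3, by omega⟩
      have hch : PySem.List.slice l (some (max 0 (((k + 3 : Nat) : Int) - 3))) (some ((k + 3 : Nat) : Int))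
          = [l.getD k ' ', l.getD (k+1) ' ', l.getD (k+2) ' '] := by
        rw [show max 0 (((k + 3 : Nat) : Int) - 3) = ((k : Nat) : Int) by push_cast; omega,
            PySem.List.slice_natCast, show (k + 3) - k = 3 from by omega,
            drop_take_three l k (by omega)]
      -- unroll B one chunk
      rw [chunksB_step l (k + 3) (by omega), hch, Nat.add_sub_cancel, List.reverse_cons]
      -- unroll A's three loop steps
      simp only [formatLoopA]
      rw [if_neg (show ¬((l.length - 1 - (k + 1)) % 3 = 0 ∧ k + 1 ≠ l.length - 1) by omega),
          if_neg (show ¬((l.length - 1 - k) % 3 = 0 ∧ k ≠ l.length - 1) by omega)]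
      by_cases hk : 0 < k
      · rw [formatLoopA_append,
            ih k (by omega) (by omega) (by omega),
            if_pos (show 0 < k ∧ k < l.length by omega),
            join_append_singleton ['.'] _ ((chunksB l k []).reverse)
              (by simp [chunksB_ne_nil l k hk])]
        by_cases hn : k + 3 < l.length
        · rw [if_pos (show (l.length - 1 - (k + 2)) % 3 = 0 ∧ k + 2 ≠ l.length - 1 by omega),
              if_pos (show 0 < k + 3 ∧ k + 3 < l.length by omega)]
          simp
        · rw [if_neg (show ¬((l.length - 1 - (k + 2)) % 3 = 0 ∧ k + 2 ≠ l.length - 1) by omega),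
              if_neg (show ¬(0 < k + 3 ∧ k + 3 < l.length) by omega)]
          simp
      · have hk0 : k = 0 := by omega
        subst hk0
        rw [chunksB_zero]
        simp only [formatLoopA, List.reverse_nil, List.nil_append,
          PySem.Chars.join_singleton]
        by_cases hn : 0 + 3 < l.length
        · rw [if_pos (show (l.length - 1 - (0 + 2)) % 3 = 0 ∧ 0 + 2 ≠ l.length - 1 by omega),
              if_pos (show 0 < 0 + 3 ∧ 0 + 3 < l.length by omega)]
          simp
        · rw [if_neg (show ¬((l.length - 1 - (0 + 2)) % 3 = 0 ∧ 0 + 2 ≠ l.length - 1) by omega),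
              if_neg (show ¬(0 < 0 + 3 ∧ 0 + 3 < l.length) by omega)]
          simp

-- ===== VERDICT (by name: the statement is the Claim_ definition above) =====
theorem format_rut_spec : Claim_equal_format_rut := by
  intro s _ _
  unfold Spec_format_rut format_rut format_rut_alt
  dsimp only
  rw [main_lemma (PySem.List.slice s.toList none (some (-1)))
        (PySem.List.slice s.toList none (some (-1))).length le_rfl (by simp)]
  simp
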